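-- pv_equiv track=rewrite | github.com/nifemiEatsBlocks/multi-cipher-Encryption-tool | bifid.py | generate_bifid_grid
-- ===== SOURCE A (Python) =====
-- def generate_bifid_grid(key):
--     key = key.upper().replace(' ','').replace('J','I')
--     alphabet = 'ABCDEFGHIKLMNOPQRSTUVWXYZ'
--
--     key_set = []
--     for char in key:
--         if char not in key_set:
--             key_set.append(char)
--     for char in alphabet:
--         if char not in key_set:
--             key_set.append(char)
--
--     return key_set
-- ===== SOURCE B (Python) =====
-- def generate_bifid_grid(key):
--     key = key.upper().replace(' ', '').replace('J', 'I')
--     def nub(cs):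
--         if not cs:
--             return []
--         head = cs[0]
--         return [head] + nub([c for c in cs[1:] if c != head])
--     return nub(list(key + 'ABCDEFGHIKLMNOPQRSTUVWXYZ'))
-- ===== Notes on version B (the rewrite author's own statement) =====
-- stated objective: alternative
-- what changed: Replaces A's two staged loops with membership checks against a growing accumulator by a single recursive filter-head dedup (Haskell nub style): take the first char of key+alphabet, remove all its later occurrences from the rest, recurse; there is no accumulator and no membership branch.
import Mathlib
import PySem

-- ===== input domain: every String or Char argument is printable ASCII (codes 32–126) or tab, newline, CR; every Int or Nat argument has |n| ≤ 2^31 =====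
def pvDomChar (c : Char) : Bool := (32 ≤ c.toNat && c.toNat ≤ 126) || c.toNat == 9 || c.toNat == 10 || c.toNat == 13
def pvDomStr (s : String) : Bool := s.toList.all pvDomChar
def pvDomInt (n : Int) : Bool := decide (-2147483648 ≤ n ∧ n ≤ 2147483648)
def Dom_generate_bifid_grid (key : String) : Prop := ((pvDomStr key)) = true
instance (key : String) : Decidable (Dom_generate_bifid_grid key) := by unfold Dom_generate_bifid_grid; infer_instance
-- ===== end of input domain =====

-- B replaces A's two accumulator loops by a recursive filter-head dedup (nub); return value only.
-- ===== PORT A =====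
def pvNorm (key : String) : String :=
  PySem.Str.replace (PySem.Str.replace (PySem.Str.upper key) " " "") "J" "I"

def pvStep (acc : List String) (c : Char) : List String :=
  let ch := String.ofList [c]
  if ch ∈ acc then acc else acc ++ [ch]

def generate_bifid_grid (key : String) : List String :=
  let k := pvNorm key
  let alphabet := "ABCDEFGHIKLMNOPQRSTUVWXYZ"
  let keySet1 := k.toList.foldl pvStep []
  alphabet.toList.foldl pvStep keySet1

-- ===== PORT B =====
def pvNub : List String → List String
  | [] => []
  | c :: cs => c :: pvNub (cs.filter (fun x => x ≠ c))
termination_by l => l.length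
decreasing_by
  simp only [List.length_unattach, List.length_cons]
  exact Nat.lt_succ_of_le (le_trans (List.length_filter_le _ _) (le_of_eq List.length_attach))

def generate_bifid_grid_alt (key : String) : List String :=
  pvNub ((pvNorm key ++ "ABCDEFGHIKLMNOPQRSTUVWXYZ").toList.map (fun c => String.ofList [c]))

-- ===== PRECONDITION & SPEC =====
def Spec_generate_bifid_grid (key : String) (out : List String) : Prop := out = generate_bifid_grid_alt key
instance (key : String) (out : List String) : Decidable (Spec_generate_bifid_grid key out) := by unfold Spec_generate_bifid_grid; infer_instance

-- ===== CLAIM (what is proved, stated in full; the proofs are below) =====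
def Claim_equal_generate_bifid_grid : Prop := ∀ (key : String), Dom_generate_bifid_grid key → Spec_generate_bifid_grid key (generate_bifid_grid key)

-- ===== LEMMAS AND PROOFS =====
lemma pvNub_nil : pvNub [] = [] := by simp [pvNub]

lemma pvNub_cons (c : String) (cs : List String) :
    pvNub (c :: cs) = c :: pvNub (cs.filter (fun x => x ≠ c)) := by simp [pvNub]

lemma pv_foldl_step_nub (l : List Char) (acc : List String) :
    l.foldl pvStep acc =
      acc ++ pvNub ((l.map (fun c => String.ofList [c])).filter (fun x => x ∉ acc)) := by
  induction l generalizing acc with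
  | nil => simp [pvNub_nil]
  | cons c cs ih =>
    by_cases h : String.ofList [c] ∈ acc
    · simp only [List.foldl_cons, pvStep, if_pos h, ih acc, List.map_cons, List.filter_cons]
      simp [h]
    · simp only [List.foldl_cons, pvStep, if_neg h, ih (acc ++ [String.ofList [c]]),
        List.map_cons, List.filter_cons]
      simp only [h, not_false_iff, decide_true, if_true, pvNub_cons, List.append_assoc, List.singleton_append]
      congr 3
      rw [List.filter_filter]
      congr 1
      funext x
      by_cases hx : x ∈ acc <;> by_cases hc : x = String.ofList [c] <;> simp [hx, hc]

-- ===== VERDICT (by name: the statement is the Claim_ definition above) =====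
theorem generate_bifid_grid_spec : Claim_equal_generate_bifid_grid := by
  intro key _
  unfold Spec_generate_bifid_grid generate_bifid_grid generate_bifid_grid_alt
  rw [← List.foldl_append, String.toList_append, pv_foldl_step_nub]
  simp
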